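-- pv_equiv track=rewrite | github.com/jollyra/advent-of-code | 2017/d3/part2.py | sum_cells
-- ===== SOURCE A (Python) =====
-- def sum_cells(coordinate_list, adjacents):
--     acc = 0
--     for coord in adjacents:
--         cell = get_coord(coordinate_list, coord)
--         if cell:
--             x, y, val = cell
--             acc += val
--     return acc
--
-- def get_coord(coordinate_list, coord):
--     for c in coordinate_list:
--         x, y, val = c
--         if (x, y) == coord:
--             return c
--     return None
-- ===== SOURCE B (Python) =====
-- def sum_cells(coordinate_list, adjacents):
--     # Cell-major: walk the cells once; each cell consumes every still-pending
--     # adjacent query matching its coordinate (so only the first cell per coord counts).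
--     acc = 0
--     remaining = list(adjacents)
--     for x, y, val in coordinate_list:
--         if (x, y) in remaining:
--             acc += val * remaining.count((x, y))
--             remaining = [c for c in remaining if c != (x, y)]
--     return acc
-- ===== Notes on version B (the rewrite author's own statement) =====
-- stated objective: alternative
-- what changed: Inverts the loop structure: instead of scanning coordinate_list once per adjacent query (query-major), B walks the cells once and lets each cell consume, with multiplicity, all still-pending adjacent queries matching its coordinate, shrinking the pending list as matches are found.
import Mathlib
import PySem

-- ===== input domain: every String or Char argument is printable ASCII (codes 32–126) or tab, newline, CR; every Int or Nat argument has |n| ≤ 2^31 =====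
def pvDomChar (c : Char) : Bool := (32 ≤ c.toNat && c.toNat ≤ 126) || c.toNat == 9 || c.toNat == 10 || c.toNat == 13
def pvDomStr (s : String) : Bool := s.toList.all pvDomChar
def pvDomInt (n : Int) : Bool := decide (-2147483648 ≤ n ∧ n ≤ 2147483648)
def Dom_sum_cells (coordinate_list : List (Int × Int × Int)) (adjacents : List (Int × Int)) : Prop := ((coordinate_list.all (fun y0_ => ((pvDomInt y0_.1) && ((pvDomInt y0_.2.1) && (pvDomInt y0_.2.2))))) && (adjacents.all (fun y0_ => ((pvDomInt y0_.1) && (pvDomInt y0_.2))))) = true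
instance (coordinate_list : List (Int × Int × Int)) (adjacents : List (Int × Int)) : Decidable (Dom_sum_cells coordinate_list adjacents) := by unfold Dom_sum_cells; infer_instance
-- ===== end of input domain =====

-- B inverts A's loop structure: one cell-major pass in which each cell consumes (with
-- multiplicity) all still-pending adjacent queries matching its coordinate (objective: alternative).

-- ===== PORT A =====
def get_coord (coordinate_list : List (Int × Int × Int)) (coord : Int × Int) : Option (Int × Int × Int) :=
  match coordinate_list with
  | [] => none
  | c :: rest => if (c.1, c.2.1) = coord then some c else get_coord rest coord

def sum_cells (coordinate_list : List (Int × Int × Int)) (adjacents : List (Int × Int)) : Int :=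
  adjacents.foldl (fun acc coord =>
    match get_coord coordinate_list coord with
    | some cell => acc + cell.2.2
    | none => acc) 0

-- ===== PORT B =====
def sum_cells_alt (coordinate_list : List (Int × Int × Int)) (adjacents : List (Int × Int)) : Int :=
  (coordinate_list.foldl (fun (st : Int × List (Int × Int)) t =>
      if (t.1, t.2.1) ∈ st.2 then
        (st.1 + t.2.2 * (PySem.List.count st.2 (t.1, t.2.1) : Int),
         st.2.filter (fun c => c ≠ (t.1, t.2.1)))
      else st) (0, adjacents)).1

-- ===== PRECONDITION & SPEC =====
def Spec_sum_cells (coordinate_list : List (Int × Int × Int)) (adjacents : List (Int × Int)) (out : Int) : Prop := out = sum_cells_alt coordinate_list adjacents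
instance (coordinate_list : List (Int × Int × Int)) (adjacents : List (Int × Int)) (out : Int) : Decidable (Spec_sum_cells coordinate_list adjacents out) := by unfold Spec_sum_cells; infer_instance

-- ===== CLAIM =====
def Claim_equal_sum_cells : Prop := ∀ (coordinate_list : List (Int × Int × Int)) (adjacents : List (Int × Int)), Dom_sum_cells coordinate_list adjacents → Spec_sum_cells coordinate_list adjacents (sum_cells coordinate_list adjacents)

-- ===== LEMMAS AND PROOFS =====

-- value A attributes to one adjacent query: first matching cell's value, else 0
def fvAux (coordinate_list : List (Int × Int × Int)) (c : Int × Int) : Int :=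
  match get_coord coordinate_list c with
  | some t => t.2.2
  | none => 0

theorem sum_cells_foldl_aux (cl : List (Int × Int × Int)) (adj : List (Int × Int)) :
    ∀ acc : Int, adj.foldl (fun acc coord =>
        match get_coord cl coord with
        | some cell => acc + cell.2.2
        | none => acc) acc = acc + (adj.map (fvAux cl)).sum := by
  induction adj with
  | nil => intro acc; simp
  | cons a t ih =>
    intro acc
    simp only [List.foldl_cons, List.map_cons, List.sum_cons, ih]
    unfold fvAux
    cases get_coord cl a <;> simp <;> ring

theorem sum_cells_eq_sum (cl : List (Int × Int × Int)) (adj : List (Int × Int)) :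
    sum_cells cl adj = (adj.map (fvAux cl)).sum := by
  unfold sum_cells
  rw [sum_cells_foldl_aux]
  simp

theorem sum_split (rem : List (Int × Int)) (k : Int × Int) (v : Int) (g : Int × Int → Int) :
    (rem.map (fun c => if k = c then v else g c)).sum =
      v * (PySem.List.count rem k : Int) + ((rem.filter (fun c => c ≠ k)).map g).sum := by
  induction rem with
  | nil => simp [PySem.List.count]
  | cons a t ih =>
    by_cases h : k = a
    · subst h
      simp only [List.map_cons, List.sum_cons, ih, PySem.List.count]
      simp [mul_add]; ring
    · simp only [List.map_cons, List.sum_cons, if_neg h, ih, PySem.List.count]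
      simp [Ne.symm h]
      ring

theorem alt_loop_inv (cl : List (Int × Int × Int)) :
    ∀ (rem : List (Int × Int)) (acc : Int),
    (cl.foldl (fun (st : Int × List (Int × Int)) t =>
      if (t.1, t.2.1) ∈ st.2 then
        (st.1 + t.2.2 * (PySem.List.count st.2 (t.1, t.2.1) : Int),
         st.2.filter (fun c => c ≠ (t.1, t.2.1)))
      else st) (acc, rem)).1 = acc + (rem.map (fvAux cl)).sum := by
  induction cl with
  | nil =>
    intro rem acc
    have h0 : ∀ c, fvAux ([] : List (Int × Int × Int)) c = 0 := fun _ => rfl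
    rw [List.map_congr_left (fun c _ => h0 c)]
    simp
  | cons t rest ih =>
    intro rem acc
    have hfv : ∀ c, fvAux (t :: rest) c = if (t.1, t.2.1) = c then t.2.2 else fvAux rest c := by
      intro c
      by_cases h : (t.1, t.2.1) = c <;> simp [fvAux, get_coord, h]
    by_cases hmem : (t.1, t.2.1) ∈ rem
    · simp only [List.foldl_cons, if_pos hmem, ih]
      have := sum_split rem (t.1, t.2.1) t.2.2 (fvAux rest)
      calc acc + t.2.2 * (PySem.List.count rem (t.1, t.2.1) : Int) +
            ((rem.filter (fun c => c ≠ (t.1, t.2.1))).map (fvAux rest)).sum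
          = acc + (rem.map (fun c => if (t.1, t.2.1) = c then t.2.2 else fvAux rest c)).sum := by
            rw [this]; ring
        _ = acc + (rem.map (fvAux (t :: rest))).sum := by
            congr 1; congr 1; exact (List.map_congr_left (fun c _ => (hfv c).symm))
    · simp only [List.foldl_cons, if_neg hmem, ih]
      congr 1; congr 1
      apply List.map_congr_left
      intro c hc
      rw [hfv c, if_neg]
      intro h; exact hmem (h ▸ hc)

theorem sum_cells_eq_alt (cl : List (Int × Int × Int)) (adj : List (Int × Int)) :
    sum_cells cl adj = sum_cells_alt cl adj := by
  rw [sum_cells_eq_sum, sum_cells_alt, alt_loop_inv, zero_add]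

-- ===== VERDICT =====
theorem sum_cells_spec : Claim_equal_sum_cells := by
  intro cl adj _
  exact sum_cells_eq_alt cl adj
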